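-- pv_equiv track=rewrite | github.com/SiddarthDuraisamy/Smart-Health-AI | backend/api/routes/ai_assistant.py | assess_symptom_urgency
-- ===== SOURCE A (Python) =====
-- from typing import Dict, List, Any, Optional
--
-- def assess_symptom_urgency(symptoms: List[str]) -> str:
--     """Assess urgency level of symptoms"""
--     emergency_symptoms = [
--         "chest pain", "difficulty breathing", "severe bleeding", "loss of consciousness",
--         "severe headache", "stroke symptoms", "heart attack", "severe allergic reaction"
--     ]
--
--     high_urgency_symptoms = [
--         "high fever", "severe pain", "persistent vomiting", "severe dizziness",
--         "difficulty swallowing", "severe abdominal pain"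
--     ]
--
--     symptoms_lower = [s.lower() for s in symptoms]
--
--     for symptom in symptoms_lower:
--         if any(emergency in symptom for emergency in emergency_symptoms):
--             return "emergency"
--
--     for symptom in symptoms_lower:
--         if any(high_urgency in symptom for high_urgency in high_urgency_symptoms):
--             return "high"
--
--     if len(symptoms) > 3:
--         return "medium"
--
--     return "low"
-- ===== SOURCE B (Python) =====
-- def assess_symptom_urgency(symptoms):
--     """Assess urgency level of symptoms (single pass over the list)."""
--     emergency_symptoms = (
--         "chest pain", "difficulty breathing", "severe bleeding", "loss of consciousness",
--         "severe headache", "stroke symptoms", "heart attack", "severe allergic reaction"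
--     )
--     high_urgency_symptoms = (
--         "high fever", "severe pain", "persistent vomiting", "severe dizziness",
--         "difficulty swallowing", "severe abdominal pain"
--     )
--     high_found = False
--     for s in symptoms:
--         sl = s.lower()
--         if any(e in sl for e in emergency_symptoms):
--             return "emergency"
--         if not high_found and any(h in sl for h in high_urgency_symptoms):
--             high_found = True
--     if high_found:
--         return "high"
--     if len(symptoms) > 3:
--         return "medium"
--     return "low"
-- ===== Notes on version B (the rewrite author's own statement) =====
-- stated objective: alternative
-- what changed: Replaces A's two sequential full scans (emergency pass, then high-urgency pass) with a single loop over the symptoms that returns 'emergency' immediately and accumulates a high_found flag, lowercasing each symptom on the fly instead of building an intermediate lowercased list.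
import Mathlib
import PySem

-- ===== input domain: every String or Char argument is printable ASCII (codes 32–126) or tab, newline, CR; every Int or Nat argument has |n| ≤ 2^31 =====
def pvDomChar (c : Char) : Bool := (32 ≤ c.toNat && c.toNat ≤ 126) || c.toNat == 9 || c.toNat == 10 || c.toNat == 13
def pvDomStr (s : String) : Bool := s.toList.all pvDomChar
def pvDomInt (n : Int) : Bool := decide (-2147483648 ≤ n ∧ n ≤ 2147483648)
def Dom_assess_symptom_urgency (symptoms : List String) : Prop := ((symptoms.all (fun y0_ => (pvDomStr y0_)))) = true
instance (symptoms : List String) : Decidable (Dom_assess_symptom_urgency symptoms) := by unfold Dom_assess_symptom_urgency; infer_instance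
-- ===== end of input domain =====

-- B replaces A's two sequential scans with a single pass that returns "emergency" early and accumulates a high_found flag (alternative decomposition, same cost).


-- ===== PORT A =====
def pvEmer : List String :=
  ["chest pain", "difficulty breathing", "severe bleeding", "loss of consciousness",
   "severe headache", "stroke symptoms", "heart attack", "severe allergic reaction"]

def pvHigh : List String :=
  ["high fever", "severe pain", "persistent vomiting", "severe dizziness",
   "difficulty swallowing", "severe abdominal pain"]

-- A's 'for symptom in symptoms_lower: if any(kw in symptom …): return <const>' loop
def pvScanA (kws : List String) : List String → Bool
  | [] => false
  | s :: rest => if kws.any (fun k => PySem.Str.isIn k s) then true else pvScanA kws rest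

def assess_symptom_urgency (symptoms : List String) : String :=
  let symptoms_lower := symptoms.map PySem.Str.lower
  if pvScanA pvEmer symptoms_lower then "emergency"
  else if pvScanA pvHigh symptoms_lower then "high"
  else if symptoms.length > 3 then "medium"
  else "low"

-- ===== PORT B =====
-- single pass: early return on emergency, accumulate high_found
def pvLoopB (symptoms : List String) (highFound : Bool) (n : Nat) : String :=
  match symptoms with
  | [] =>
    if highFound then "high" else if n > 3 then "medium" else "low"
  | s :: rest =>
    let sl := PySem.Str.lower s
    if pvEmer.any (fun e => PySem.Str.isIn e sl) then "emergency"
    else pvLoopB rest (if !highFound && pvHigh.any (fun h => PySem.Str.isIn h sl) then true else highFound) n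

def assess_symptom_urgency_alt (symptoms : List String) : String :=
  pvLoopB symptoms false symptoms.length

-- ===== PRECONDITION & SPEC =====
def Spec_assess_symptom_urgency (symptoms : List String) (out : String) : Prop := out = assess_symptom_urgency_alt symptoms
instance (symptoms : List String) (out : String) : Decidable (Spec_assess_symptom_urgency symptoms out) := by unfold Spec_assess_symptom_urgency; infer_instance

-- ===== CLAIM (what is proved, stated in full; the proofs are below) =====
def Claim_equal_assess_symptom_urgency : Prop := ∀ (symptoms : List String), Dom_assess_symptom_urgency symptoms → Spec_assess_symptom_urgency symptoms (assess_symptom_urgency symptoms)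

-- ===== LEMMAS AND PROOFS =====
theorem pvLoopB_eq (xs : List String) (hf : Bool) (n : Nat) :
    pvLoopB xs hf n =
      if pvScanA pvEmer (xs.map PySem.Str.lower) then "emergency"
      else if hf || pvScanA pvHigh (xs.map PySem.Str.lower) then "high"
      else if n > 3 then "medium" else "low" := by
  induction xs generalizing hf with
  | nil => simp [pvLoopB, pvScanA]
  | cons s rest ih =>
    rw [pvLoopB, ih]
    cases he : pvEmer.any (fun e => PySem.Str.isIn e (PySem.Str.lower s)) <;>
      cases hh : pvHigh.any (fun h => PySem.Str.isIn h (PySem.Str.lower s)) <;>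
        cases hf <;>
          simp only [List.map_cons, pvScanA, he, hh, Bool.not_false, Bool.not_true,
            Bool.false_and, Bool.true_and, Bool.and_self, Bool.false_or, Bool.true_or,
            Bool.or_false, Bool.or_true, if_true, if_false, Bool.true_eq_false,
            cond_true, cond_false, ite_true, ite_false, Bool.false_eq_true]

-- ===== VERDICT (by name: the statement is the Claim_ definition above) =====
theorem assess_symptom_urgency_spec : Claim_equal_assess_symptom_urgency := by
  intro symptoms _
  unfold Spec_assess_symptom_urgency assess_symptom_urgency assess_symptom_urgency_alt
  rw [pvLoopB_eq]
  simp
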